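-- pv_equiv track=rewrite | github.com/LeKhang97/2DRNA_Prediction | Process_Output/def_function.py | compare_two_contacts
-- ===== SOURCE A (Python) =====
-- def compare_two_contacts(true2d, prediction):
-- 	true_contacts = [p for p,v in enumerate(true2d) if v == "*"]
-- 	pred_contacts = [p for p,v in enumerate(prediction) if v == "*"]
-- 	tp = 0
-- 	fp = 0
-- 	tn = 0
-- 	fn = 0
-- 	for bp in true_contacts:
-- 		if bp in pred_contacts:
-- 			tp += 1
-- 		else:
-- 			fn += 1
-- 	for bp in pred_contacts:
-- 		if bp not in true_contacts:
-- 			fp += 1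
-- 	tn = len(true2d) - fp - fn - tp
-- 	return [tp, tn, fp, fn]
-- ===== SOURCE B (Python) =====
-- def compare_two_contacts(true2d, prediction):
--     tp = fn = fp = 0
--     for i in range(max(len(true2d), len(prediction))):
--         t = i < len(true2d) and true2d[i] == '*'
--         p = i < len(prediction) and prediction[i] == '*'
--         if t and p:
--             tp += 1
--         elif t:
--             fn += 1
--         elif p:
--             fp += 1
--     return [tp, len(true2d) - tp - fp - fn, fp, fn]
-- ===== Notes on version B (the rewrite author's own statement) =====
-- stated objective: alternative
-- what changed: Replaced the two '*'-position-list builds and their list-membership tests by a single indexed pass over range(max(len,len)) that classifies each position directly into tp/fn/fp counters, with tn by subtraction.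
import Mathlib
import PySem

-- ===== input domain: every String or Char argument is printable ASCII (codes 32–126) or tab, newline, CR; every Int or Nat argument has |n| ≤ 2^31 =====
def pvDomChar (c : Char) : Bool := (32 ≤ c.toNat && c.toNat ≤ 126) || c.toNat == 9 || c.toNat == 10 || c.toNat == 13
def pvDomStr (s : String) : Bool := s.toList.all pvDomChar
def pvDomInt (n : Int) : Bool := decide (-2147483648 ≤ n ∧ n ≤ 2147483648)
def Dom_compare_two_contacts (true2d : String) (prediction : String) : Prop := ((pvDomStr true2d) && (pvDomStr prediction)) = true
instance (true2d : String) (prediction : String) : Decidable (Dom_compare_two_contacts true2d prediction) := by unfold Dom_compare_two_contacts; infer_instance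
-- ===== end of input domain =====

-- B replaces A's position lists and membership tests by a single indexed counting pass over the positions (alternative algorithm, same result).


-- ===== PORT A =====
-- positions of '*' : [p for p,v in enumerate(s) if v == "*"]
def ctcContacts (s : List Char) : List Int :=
  ((PySem.List.enumerate s 0).filter (fun pv => pv.2 == '*')).map (fun pv => pv.1)

def compare_two_contacts (true2d : String) (prediction : String) : List Int :=
  let true_contacts := ctcContacts true2d.toList
  let pred_contacts := ctcContacts prediction.toList
  -- first loop: tp/fn over true_contacts
  let tpfn : Int × Int := true_contacts.foldl
    (fun acc bp => if bp ∈ pred_contacts then (acc.1 + 1, acc.2) else (acc.1, acc.2 + 1)) (0, 0)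
  -- second loop: fp over pred_contacts
  let fp : Int := pred_contacts.foldl
    (fun acc bp => if bp ∉ true_contacts then acc + 1 else acc) 0
  let tn : Int := (true2d.toList.length : Int) - fp - tpfn.2 - tpfn.1
  [tpfn.1, tn, fp, tpfn.2]

-- ===== PORT B =====
-- single pass over range(max(len t, len p)), accumulator (tp, fn, fp)
def ctcStep (t p : List Char) (acc : Int × Int × Int) (i : Nat) : Int × Int × Int :=
  let tb := t[i]? == some '*'
  let pb := p[i]? == some '*'
  if tb && pb then (acc.1 + 1, acc.2.1, acc.2.2)
  else if tb then (acc.1, acc.2.1 + 1, acc.2.2)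
  else if pb then (acc.1, acc.2.1, acc.2.2 + 1)
  else acc

def compare_two_contacts_alt (true2d : String) (prediction : String) : List Int :=
  let t := true2d.toList
  let p := prediction.toList
  let r := (List.range (max t.length p.length)).foldl (ctcStep t p) (0, 0, 0)
  [r.1, (t.length : Int) - r.1 - r.2.2 - r.2.1, r.2.2, r.2.1]

-- ===== PRECONDITION & SPEC =====
def Spec_compare_two_contacts (true2d : String) (prediction : String) (out : List Int) : Prop := out = compare_two_contacts_alt true2d prediction
instance (true2d : String) (prediction : String) (out : List Int) : Decidable (Spec_compare_two_contacts true2d prediction out) := by unfold Spec_compare_two_contacts; infer_instance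

-- ===== CLAIM (what is proved, stated in full; the proofs are below) =====
def Claim_equal_compare_two_contacts : Prop := ∀ (true2d : String) (prediction : String), Dom_compare_two_contacts true2d prediction → Spec_compare_two_contacts true2d prediction (compare_two_contacts true2d prediction)

-- ===== LEMMAS AND PROOFS =====

-- proof-side characterisation of A's position lists
def ctcPos : List Char → Int → List Int
  | [], _ => []
  | a :: s, k => (if a = '*' then [k] else []) ++ ctcPos s (k + 1)

theorem ctcContacts_eq_pos (s : List Char) : ∀ k : Int,
    ((PySem.List.enumerate s k).filter (fun pv => pv.2 == '*')).map (fun pv => pv.1) = ctcPos s k := by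
  induction s with
  | nil => intro k; simp [PySem.List.enumerate_nil, ctcPos]
  | cons a s ih =>
    intro k
    rw [PySem.List.enumerate_cons]
    by_cases h : a = '*' <;> simp [ctcPos, h, ih]

theorem mem_ctcPos (s : List Char) : ∀ (k j : Int), j ∈ ctcPos s k ↔ ∃ i : Nat, s[i]? = some '*' ∧ j = k + i := by
  induction s with
  | nil => intro k j; simp [ctcPos]
  | cons a s ih =>
    intro k j
    simp only [ctcPos, List.mem_append, ih]
    constructor
    · rintro (h | ⟨i, hi, rfl⟩)
      · by_cases ha : a = '*'
        · simp only [ha, if_true] at h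
          exact ⟨0, by simp [ha], by simpa using h⟩
        · simp [ha] at h
      · exact ⟨i + 1, by simpa using hi, by push_cast; ring⟩
    · rintro ⟨i, hi, rfl⟩
      cases i with
      | zero =>
        left
        simp only [List.getElem?_cons_zero, Option.some.injEq] at hi
        simp [hi]
      | succ i =>
        right
        exact ⟨i, by simpa using hi, by push_cast; ring⟩

theorem countP_ctcPos (s : List Char) (Q : Int → Bool) : ∀ k : Int,
    (ctcPos s k).countP Q
      = (List.range s.length).countP (fun (i : Nat) => (s[i]? == some '*') && Q (k + (i : Int))) := by
  induction s with
  | nil => intro k; simp [ctcPos]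
  | cons a s ih =>
    intro k
    rw [List.length_cons, List.range_succ_eq_map]
    simp only [ctcPos, List.countP_append, List.countP_cons, List.countP_map, ih]
    have hcomp : (List.range s.length).countP
        ((fun (i : Nat) => ((a :: s)[i]? == some '*') && Q (k + (i : Int))) ∘ Nat.succ)
        = (List.range s.length).countP (fun (i : Nat) => (s[i]? == some '*') && Q ((k + 1) + (i : Int))) := by
      apply List.countP_congr
      intro i _
      have harg : k + ((i : Int) + 1) = (k + 1) + (i : Int) := by ring
      simp only [Function.comp, List.getElem?_cons_succ, Nat.succ_eq_add_one]
      push_cast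
      rw [harg]
    by_cases h : a = '*'
    · subst h
      simp [hcomp, Nat.add_comm]
    · simp [h, hcomp]

theorem ctc_countP_contacts (s : List Char) (Q : Int → Bool) :
    ((ctcContacts s).countP Q)
      = (List.range s.length).countP (fun (i : Nat) => (s[i]? == some '*') && Q (i : Int)) := by
  rw [ctcContacts, ctcContacts_eq_pos, countP_ctcPos]
  apply List.countP_congr
  intro i _
  simp

theorem mem_ctcContacts (s : List Char) (i : Nat) :
    ((i : Int) ∈ ctcContacts s) ↔ s[i]? = some '*' := by
  rw [ctcContacts, ctcContacts_eq_pos, mem_ctcPos]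
  constructor
  · rintro ⟨j, hj, hji⟩
    have : j = i := by omega
    subst this; exact hj
  · intro h
    exact ⟨i, h, by simp⟩

-- A's first loop
theorem ctc_loop1 (cp : List Int) (l : List Int) : ∀ (x y : Int),
    l.foldl (fun acc bp => if bp ∈ cp then (acc.1 + 1, acc.2) else (acc.1, acc.2 + 1)) (x, y)
      = (x + (l.countP (fun bp => bp ∈ cp) : Int), y + (l.countP (fun bp => ¬ bp ∈ cp) : Int)) := by
  induction l with
  | nil => intro x y; simp
  | cons a l ih =>
    intro x y
    rw [List.foldl_cons]
    by_cases h : a ∈ cp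
    · rw [if_pos h, ih, List.countP_cons, List.countP_cons]
      simp only [h, decide_true, decide_not, Bool.not_true, Prod.mk.injEq]
      constructor <;> push_cast <;> ring
    · rw [if_neg h, ih, List.countP_cons, List.countP_cons]
      simp only [h, decide_false, decide_not, Bool.not_false, Prod.mk.injEq]
      constructor <;> · push_cast; ring

-- A's second loop
theorem ctc_loop2 (ct : List Int) (l : List Int) : ∀ (x : Int),
    l.foldl (fun acc bp => if bp ∉ ct then acc + 1 else acc) x
      = x + (l.countP (fun bp => ¬ bp ∈ ct) : Int) := by
  induction l with
  | nil => intro x; simp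
  | cons a l ih =>
    intro x
    rw [List.foldl_cons]
    by_cases h : a ∈ ct
    · rw [if_neg (by simp [h]), ih, List.countP_cons]
      simp [h]
    · rw [if_pos h, ih, List.countP_cons]
      simp only [h, decide_false, decide_not, Bool.not_false, if_true]
      push_cast
      ring

-- B's loop
theorem ctc_loopB (t p : List Char) (l : List Nat) : ∀ (x y z : Int),
    l.foldl (ctcStep t p) (x, y, z)
      = (x + (l.countP (fun (i : Nat) => (t[i]? == some '*') && (p[i]? == some '*')) : Int),
         y + (l.countP (fun (i : Nat) => (t[i]? == some '*') && !(p[i]? == some '*')) : Int),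
         z + (l.countP (fun (i : Nat) => !(t[i]? == some '*') && (p[i]? == some '*')) : Int)) := by
  induction l with
  | nil => intro x y z; simp
  | cons a l ih =>
    intro x y z
    simp only [List.foldl_cons, List.countP_cons]
    by_cases ht : t[a]? = some '*' <;> by_cases hp : p[a]? = some '*' <;>
      simp [ctcStep, ht, hp, ih] <;> push_cast <;> ring

-- extend/shrink the counted range when the predicate is false past n
theorem ctc_countP_range_ext (P : Nat → Bool) (n m : Nat) (h : n ≤ m)
    (h2 : ∀ i, n ≤ i → P i = false) :
    (List.range m).countP P = (List.range n).countP P := by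
  induction m with
  | zero =>
    have hn : n = 0 := Nat.le_zero.mp h
    simp [hn]
  | succ m ih =>
    rcases Nat.lt_or_ge n (m + 1) with hlt | hge
    · have hnm : n ≤ m := by omega
      rw [List.range_succ, List.countP_append, ih hnm]
      simp [h2 m hnm]
    · have : n = m + 1 := by omega
      simp [this]

-- membership in contacts as a Bool, at nonnegative indices
theorem ctc_decide_mem (s : List Char) (i : Nat) :
    (decide ((i : Int) ∈ ctcContacts s)) = (s[i]? == some '*') := by
  rcases h : s[i]? == some '*'
  · simp only [beq_eq_false_iff_ne] at h
    simp [mem_ctcContacts, h]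
  · simp only [beq_iff_eq] at h
    simp [mem_ctcContacts, h]

theorem ctc_decide_not_mem (s : List Char) (i : Nat) :
    (decide (¬ (i : Int) ∈ ctcContacts s)) = !(s[i]? == some '*') := by
  rw [decide_not, ctc_decide_mem]

-- ===== VERDICT (by name: the statement is the Claim_ definition above) =====
theorem compare_two_contacts_spec : Claim_equal_compare_two_contacts := by
  intro true2d prediction _
  unfold Spec_compare_two_contacts compare_two_contacts compare_two_contacts_alt
  set t := true2d.toList with ht
  set p := prediction.toList with hp
  simp only []
  rw [ctc_loop1, ctc_loop2, ctc_loopB]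
  -- reduce A's three counts to range-countP form
  have htp : (ctcContacts t).countP (fun bp => decide (bp ∈ ctcContacts p))
      = (List.range t.length).countP (fun (i : Nat) => (t[i]? == some '*') && (p[i]? == some '*')) := by
    rw [ctc_countP_contacts]
    apply List.countP_congr; intro i _
    simp only [List.mem_range] at *
    rw [ctc_decide_mem]
  have hfn : (ctcContacts t).countP (fun bp => decide (¬ bp ∈ ctcContacts p))
      = (List.range t.length).countP (fun (i : Nat) => (t[i]? == some '*') && !(p[i]? == some '*')) := by
    rw [ctc_countP_contacts]
    apply List.countP_congr; intro i _
    rw [ctc_decide_not_mem]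
  have hfp : (ctcContacts p).countP (fun bp => decide (¬ bp ∈ ctcContacts t))
      = (List.range p.length).countP (fun (i : Nat) => (p[i]? == some '*') && !(t[i]? == some '*')) := by
    rw [ctc_countP_contacts]
    apply List.countP_congr; intro i _
    rw [ctc_decide_not_mem]
  -- extend each to range (max)
  have e1 : (List.range (max t.length p.length)).countP (fun (i : Nat) => (t[i]? == some '*') && (p[i]? == some '*'))
      = (List.range t.length).countP (fun (i : Nat) => (t[i]? == some '*') && (p[i]? == some '*')) := by
    apply ctc_countP_range_ext _ _ _ (Nat.le_max_left _ _)
    intro i hi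
    have : t[i]? = none := List.getElem?_eq_none hi
    simp [this]
  have e2 : (List.range (max t.length p.length)).countP (fun (i : Nat) => (t[i]? == some '*') && !(p[i]? == some '*'))
      = (List.range t.length).countP (fun (i : Nat) => (t[i]? == some '*') && !(p[i]? == some '*')) := by
    apply ctc_countP_range_ext _ _ _ (Nat.le_max_left _ _)
    intro i hi
    have : t[i]? = none := List.getElem?_eq_none hi
    simp [this]
  have e3 : (List.range (max t.length p.length)).countP (fun (i : Nat) => !(t[i]? == some '*') && (p[i]? == some '*'))
      = (List.range p.length).countP (fun (i : Nat) => (p[i]? == some '*') && !(t[i]? == some '*')) := by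
    rw [ctc_countP_range_ext _ p.length _ (Nat.le_max_right _ _)]
    · apply List.countP_congr; intro i _; simp [Bool.and_comm]
    · intro i hi
      have : p[i]? = none := List.getElem?_eq_none hi
      simp [this]
  simp only [htp, hfn, hfp, e1, e2, e3]
  simp only [List.cons.injEq, and_true]
  exact ⟨trivial, by ring⟩
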